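-- pv_equiv track=rewrite | github.com/thouis/triplet_hashing | triplet.py | index_loop_over_triplets
-- ===== SOURCE A (Python) =====
-- from collections import defaultdict
--
-- def index_group_by_label(labels):
--     """ compute indices into argument grouped by value
--     """
--     idx_by_label = defaultdict(list)
--     for idx, l in enumerate(labels):
--         idx_by_label[l].append(idx)
--     return idx_by_label
--
-- def index_loop_over_triplets(labels):
--     """ Generator for all indices of triplets (i1, i2, i3) such that
--     labels[i1] == labels[i2] != labels[i3] and (i1 < i2)
--     """
--     idx_by_label = index_group_by_label(labels)
--
--     for l1_l2, idx_l1_l2 in idx_by_label.items():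
--         for l3, idx_l3 in idx_by_label.items():
--             if l1_l2 == l3:
--                 continue
--             for i1 in idx_l1_l2:
--                 for i2 in idx_l1_l2:
--                     if i1 >= i2:
--                         continue
--                     for i3 in idx_l3:
--                         yield (i1, i2, i3)
-- ===== SOURCE B (Python) =====
-- def _index_pairs(ix):
--     # all (x, y) with x before y in ix, in the order the suffix walk emits them
--     out = []
--     t = ix
--     while t:
--         x, t = t[0], t[1:]
--         for y in t:
--             out.append((x, y))
--     return out
--
-- def index_loop_over_triplets(labels):
--     """ Generator for all indices of triplets (i1, i2, i3) such that
--     labels[i1] == labels[i2] != labels[i3] and (i1 < i2)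
--     """
--     idx_by_label = {}
--     for i, l in enumerate(labels):
--         idx_by_label.setdefault(l, []).append(i)
--     items = list(idx_by_label.items())
--     pair_table = [(l, _index_pairs(ix)) for l, ix in items]
--     for l1, pairs in pair_table:
--         for l3, ix3 in items:
--             if l3 == l1:
--                 continue
--             for i1, i2 in pairs:
--                 for i3 in ix3:
--                     yield (i1, i2, i3)
-- ===== Notes on version B (the rewrite author's own statement) =====
-- stated objective: alternative
-- what changed: B precomputes, once per label, the list of index pairs (i1,i2) with i1<i2 via a suffix walk over the group's index list, then emits triplets by iterating that table, instead of A's value-comparison skip-loop re-run for every other label.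
import Mathlib
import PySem

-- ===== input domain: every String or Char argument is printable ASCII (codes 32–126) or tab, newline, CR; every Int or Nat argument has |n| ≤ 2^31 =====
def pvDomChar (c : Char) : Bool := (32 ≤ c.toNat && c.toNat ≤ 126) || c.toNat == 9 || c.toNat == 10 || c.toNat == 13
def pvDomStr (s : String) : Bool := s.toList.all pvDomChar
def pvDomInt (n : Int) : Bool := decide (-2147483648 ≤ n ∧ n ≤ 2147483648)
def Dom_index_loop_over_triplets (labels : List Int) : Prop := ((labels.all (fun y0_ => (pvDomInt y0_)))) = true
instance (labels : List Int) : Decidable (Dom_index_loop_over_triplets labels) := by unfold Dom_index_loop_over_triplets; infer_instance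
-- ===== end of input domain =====

-- B precomputes the (i1,i2) pair list once per label and drives the emission from that table;
-- same output, A's per-(l1,l3) i1/i2 skip-loop disappears (objective: alternative decomposition).

-- ===== PORT A =====
-- index_group_by_label: defaultdict(list); d[l].append(idx) = modify l [] (· ++ [idx])
def pvGroupByLabel (labels : List Int) : PySem.Dict Int (List Int) :=
  (PySem.List.enumerate labels).foldl (fun d p => d.modify p.2 [] (· ++ [p.1])) PySem.Dict.empty

-- generator: nested for/continue/yield ported as nested flatMap with [] on continue
def index_loop_over_triplets (labels : List Int) : List (Int × Int × Int) :=
  let idx_by_label := pvGroupByLabel labels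
  idx_by_label.items.flatMap (fun p1 =>
    idx_by_label.items.flatMap (fun p3 =>
      if p1.1 == p3.1 then []
      else p1.2.flatMap (fun i1 =>
        p1.2.flatMap (fun i2 =>
          if i1 ≥ i2 then []
          else p3.2.map (fun i3 => (i1, i2, i3))))))

-- ===== PORT B =====
-- _index_pairs: suffix walk (x, t = t[0], t[1:]; pair x with every y in t)
def pvIndexPairs : List Int → List (Int × Int)
  | [] => []
  | x :: t => t.map (fun y => (x, y)) ++ pvIndexPairs t

def index_loop_over_triplets_alt (labels : List Int) : List (Int × Int × Int) :=
  let idx_by_label :=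
    (PySem.List.enumerate labels).foldl (fun d p => d.modify p.2 [] (· ++ [p.1])) PySem.Dict.empty
  let items := idx_by_label.items
  let pair_table := items.map (fun p => (p.1, pvIndexPairs p.2))
  pair_table.flatMap (fun q =>
    items.flatMap (fun p3 =>
      if p3.1 == q.1 then []
      else q.2.flatMap (fun pr => p3.2.map (fun i3 => (pr.1, pr.2, i3)))))

-- ===== PRECONDITION & SPEC =====
def Spec_index_loop_over_triplets (labels : List Int) (out : List (Int × Int × Int)) : Prop := out = index_loop_over_triplets_alt labels
instance (labels : List Int) (out : List (Int × Int × Int)) : Decidable (Spec_index_loop_over_triplets labels out) := by unfold Spec_index_loop_over_triplets; infer_instance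

-- ===== CLAIM (what is proved, stated in full; the proofs are below) =====
def Claim_equal_index_loop_over_triplets : Prop := ∀ (labels : List Int), Dom_index_loop_over_triplets labels → Spec_index_loop_over_triplets labels (index_loop_over_triplets labels)

-- ===== LEMMAS AND PROOFS =====

-- A's value-comparison double loop over a strictly increasing list IS the pair list of B's suffix walk.
theorem pairs_of_pairwise {γ : Type} (g : Int → Int → List γ) :
    ∀ (ix : List Int), ix.Pairwise (· < ·) →
      ix.flatMap (fun i1 => ix.flatMap (fun i2 => if i1 ≥ i2 then [] else g i1 i2))
        = (pvIndexPairs ix).flatMap (fun pr => g pr.1 pr.2) := by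
  intro ix
  induction ix with
  | nil => simp [pvIndexPairs]
  | cons x t ih =>
    intro hp
    rw [List.pairwise_cons] at hp
    obtain ⟨hx, hpt⟩ := hp
    have hinner : ∀ i1, i1 ∈ t →
        (x :: t).flatMap (fun i2 => if i1 ≥ i2 then [] else g i1 i2)
          = t.flatMap (fun i2 => if i1 ≥ i2 then [] else g i1 i2) := by
      intro i1 h1
      have : i1 ≥ x := le_of_lt (hx i1 h1)
      simp [List.flatMap_cons, this]
    have hhead :
        (x :: t).flatMap (fun i2 => if x ≥ i2 then [] else g x i2)
          = t.flatMap (fun y => g x y) := by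
      rw [List.flatMap_cons]
      simp only [ge_iff_le, le_refl, if_pos, List.nil_append]
      apply List.flatMap_congr
      intro y hy
      have : ¬ x ≥ y := not_le.mpr (hx y hy)
      simp [this]
    calc (x :: t).flatMap (fun i1 => (x :: t).flatMap (fun i2 => if i1 ≥ i2 then [] else g i1 i2))
        = t.flatMap (fun y => g x y)
            ++ t.flatMap (fun i1 => (x :: t).flatMap (fun i2 => if i1 ≥ i2 then [] else g i1 i2)) := by
          rw [List.flatMap_cons, hhead]
      _ = t.flatMap (fun y => g x y)
            ++ t.flatMap (fun i1 => t.flatMap (fun i2 => if i1 ≥ i2 then [] else g i1 i2)) := by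
          rw [List.flatMap_congr hinner]
      _ = (pvIndexPairs (x :: t)).flatMap (fun pr => g pr.1 pr.2) := by
          rw [ih hpt, pvIndexPairs]
          simp [List.flatMap_append, List.flatMap_map]

-- every index list stored by the grouping dict is strictly increasing
theorem group_values_pairwise (labels : List Int) :
    ∀ p ∈ (pvGroupByLabel labels).items, p.2.Pairwise (· < ·) := by
  intro p hp
  have hnd : (pvGroupByLabel labels).keys.Nodup := by
    unfold pvGroupByLabel
    exact PySem.Dict.nodup_keys_foldl_modify_key _ _ _ _ _ PySem.Dict.nodup_keys_empty
  obtain ⟨k, v⟩ := p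
  have hv : (pvGroupByLabel labels).getD k [] = v :=
    PySem.Dict.getD_of_mem_items _ hp hnd []
  have hfold : (pvGroupByLabel labels).getD k []
      = (((PySem.List.enumerate labels 0).map (fun p => (p.2, p.1))).filter
          (fun p => p.1 == k)).map (·.2) := by
    unfold pvGroupByLabel
    have h := PySem.Dict.getD_foldl_modify_append
      ((PySem.List.enumerate labels 0).map (fun p : Int × Int => (p.2, p.1))) PySem.Dict.empty k
    rw [List.foldl_map] at h
    simpa using h
  have henum : ((PySem.List.enumerate labels 0).map (fun p => (p.2, p.1))).Pairwise
      (fun a b => a.2 < b.2) := by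
    rw [List.pairwise_map]
    exact PySem.List.pairwise_lt_enumerate labels 0
  have : ((((PySem.List.enumerate labels 0).map (fun p => (p.2, p.1))).filter
          (fun p => p.1 == k)).map (·.2)).Pairwise (· < ·) := by
    rw [List.pairwise_map]
    exact henum.filter _
  simpa [← hv, hfold] using this

-- ===== VERDICT (by name: the statement is the Claim_ definition above) =====
theorem index_loop_over_triplets_spec : Claim_equal_index_loop_over_triplets := by
  intro labels _
  unfold Spec_index_loop_over_triplets index_loop_over_triplets index_loop_over_triplets_alt
  rw [show ((PySem.List.enumerate labels).foldl (fun d p => d.modify p.2 [] (· ++ [p.1]))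
        PySem.Dict.empty) = pvGroupByLabel labels from rfl]
  simp only [List.flatMap_map]
  apply List.flatMap_congr
  intro p1 h1
  apply List.flatMap_congr
  intro p3 _
  have hcomm : (p1.1 == p3.1) = (p3.1 == p1.1) := by
    simp [eq_comm]
  rw [← hcomm]
  by_cases h : p1.1 == p3.1
  · simp [h]
  · simp only [h, if_neg, Bool.false_eq_true, not_false_eq_true]
    exact pairs_of_pairwise (fun i1 i2 => p3.2.map (fun i3 => (i1, i2, i3))) p1.2
      (group_values_pairwise labels p1 h1)
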